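-- pv_equiv track=rewrite | github.com/VolodymyrRushchak/University | algorithms/lab3/main.py | get_comb_num
-- ===== SOURCE A (Python) =====
-- from typing import List, Tuple
--
-- def get_comb_num(input_list: List[Tuple[int, int]]) -> int:
--     tribe_of = {}
--     tribe_count = 0
--     tribes = [[0, 0]]
--     for a, b in input_list:
--         is_a, is_b = a in tribe_of.keys(), b in tribe_of.keys()
--         if not is_a and not is_b:
--             tribe_of[a] = tribe_count
--             tribe_of[b] = tribe_count
--             tribes[tribe_count][a % 2] += 1
--             tribes[tribe_count][b % 2] += 1
--             tribe_count += 1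
--             tribes.append([0, 0])
--         elif not is_a:
--             tribe_of[a] = tribe_of[b]
--             tribes[tribe_of[b]][a % 2] += 1
--         elif not is_b:
--             tribe_of[b] = tribe_of[a]
--             tribes[tribe_of[a]][b % 2] += 1
--     total_girls = sum((tribe[0] for tribe in tribes))
--     result = 0
--     for girls, boys in tribes:
--         result += boys * (total_girls - girls)
--     return result
-- ===== SOURCE B (Python) =====
-- from typing import List, Tuple
--
-- def get_comb_num(input_list: List[Tuple[int, int]]) -> int:
--     # Pass 1: build a pointer forest.  An edge between two already-known nodes is
--     # ignored, so trees never merge and plain parent pointers suffice; record one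
--     # (node, parent) link per membership the forest acquires.
--     parent = {}
--     links = []
--     for a, b in input_list:
--         if a not in parent:
--             if b not in parent:
--                 parent[a] = a
--                 parent[b] = a
--                 links.append((a, a))
--                 links.append((b, a))
--             else:
--                 parent[a] = b
--                 links.append((a, b))
--         elif b not in parent:
--             parent[b] = a
--             links.append((b, a))
--
--     # Pass 2: every parent pointer refers to an earlier-inserted node (or itself),
--     # so one in-order sweep resolves each node's tree root without any walking.
--     root = {}
--     for x, p in parent.items():
--         root[x] = x if p == x else root[p]
--
--     # Pass 3: tally memberships per tree root, then use the closed form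
--     # total_boys*total_girls - sum of within-tree boy*girl products.
--     girls = {}
--     boys = {}
--     for node, _ in links:
--         r = root[node]
--         if node % 2 == 0:
--             girls[r] = girls.get(r, 0) + 1
--         else:
--             boys[r] = boys.get(r, 0) + 1
--     total_girls = sum(girls.values())
--     total_boys = sum(boys.values())
--     return total_boys * total_girls - sum(g * boys.get(r, 0) for r, g in girls.items())
-- ===== Notes on version B (the rewrite author's own statement) =====
-- stated objective: alternative
-- what changed: Instead of A's single loop that maintains tribe indices and live per-tribe girl/boy tallies, B builds a pointer forest (parent pointers only, no tallies, no tribe counter), resolves every node's tree root by one in-order sweep over the parent dict, tallies memberships per root afterwards, and returns the closed form total_boys*total_girls - sum of within-tree boy*girl products instead of A's sum of boys*(total_girls-girls).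
import Mathlib
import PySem

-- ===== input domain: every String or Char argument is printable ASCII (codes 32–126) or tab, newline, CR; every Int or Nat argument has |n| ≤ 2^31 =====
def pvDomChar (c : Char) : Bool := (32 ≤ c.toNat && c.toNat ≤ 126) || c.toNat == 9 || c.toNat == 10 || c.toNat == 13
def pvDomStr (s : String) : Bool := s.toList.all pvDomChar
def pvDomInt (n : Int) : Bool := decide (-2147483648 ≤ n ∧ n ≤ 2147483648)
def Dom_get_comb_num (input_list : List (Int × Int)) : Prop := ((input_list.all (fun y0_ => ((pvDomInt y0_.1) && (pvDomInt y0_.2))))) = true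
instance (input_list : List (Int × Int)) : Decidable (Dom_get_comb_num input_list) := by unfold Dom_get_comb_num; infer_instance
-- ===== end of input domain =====

-- B replaces A's single loop with inline per-tribe girl/boy tallies by a pointer-forest scheme:
-- pass 1 records only parent pointers and membership links, pass 2 resolves each node's tree
-- root by one in-order sweep, pass 3 tallies members per root and uses the closed form
-- total_boys*total_girls − Σ within-tree boy·girl; same asymptotic cost (objective: alternative).

-- ===== PORT A =====
-- tribes[t][a % 2] += 1 : a pair (girls, boys) stands for Python's two-element list [girls, boys]
def pvBump (p : Int) (gb : Int × Int) : Int × Int :=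
  if p = 0 then (gb.1 + 1, gb.2) else (gb.1, gb.2 + 1)

def pvStepA (st : PySem.Dict Int Nat × Nat × List (Int × Int)) (ab : Int × Int) :
    PySem.Dict Int Nat × Nat × List (Int × Int) :=
  let is_a := st.1.contains ab.1
  let is_b := st.1.contains ab.2
  if !is_a && !is_b then
    ((st.1.insert ab.1 st.2.1).insert ab.2 st.2.1, st.2.1 + 1,
      ((st.2.2.modify st.2.1 (pvBump (PySem.Int.mod ab.1 2))).modify st.2.1
        (pvBump (PySem.Int.mod ab.2 2))) ++ [(0, 0)])
  else if !is_a then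
    (st.1.insert ab.1 (st.1.getD ab.2 0), st.2.1,
      st.2.2.modify (st.1.getD ab.2 0) (pvBump (PySem.Int.mod ab.1 2)))
  else if !is_b then
    (st.1.insert ab.2 (st.1.getD ab.1 0), st.2.1,
      st.2.2.modify (st.1.getD ab.1 0) (pvBump (PySem.Int.mod ab.2 2)))
  else st

def get_comb_num (input_list : List (Int × Int)) : Int :=
  let st := input_list.foldl pvStepA (PySem.Dict.empty, 0, [(0, 0)])
  let total_girls := (st.2.2.map (·.1)).sum
  st.2.2.foldl (fun r gb => r + gb.2 * (total_girls - gb.1)) 0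

-- ===== PORT B =====
-- pass 1: parent pointers plus one (node, parent) link per acquired membership
def pvLink (st : PySem.Dict Int Int × List (Int × Int)) (ab : Int × Int) :
    PySem.Dict Int Int × List (Int × Int) :=
  if st.1.contains ab.1 = false then
    if st.1.contains ab.2 = false then
      ((st.1.insert ab.1 ab.1).insert ab.2 ab.1,
        st.2 ++ [(ab.1, ab.1), (ab.2, ab.1)])
    else (st.1.insert ab.1 ab.2, st.2 ++ [(ab.1, ab.2)])
  else if st.1.contains ab.2 = false then
    (st.1.insert ab.2 ab.1, st.2 ++ [(ab.2, ab.1)])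
  else st

-- pass 2: root[x] = x if p == x else root[p]  (Python's root[p] cannot miss, since a parent is
-- inserted before its child; the getD default is only a totalization guard for that lookup)
def pvRootStep (d : PySem.Dict Int Int) (xp : Int × Int) : PySem.Dict Int Int :=
  d.insert xp.1 (if xp.2 = xp.1 then xp.1 else d.getD xp.2 xp.2)

-- pass 3: girls[r] = girls.get(r, 0) + 1 / boys[r] = …  (root[node] cannot miss either:
-- every linked node is a key of parent; the getD default is only a totalization guard)
def pvTallyStep (rootD : PySem.Dict Int Int)
    (st : PySem.Dict Int Int × PySem.Dict Int Int) (lnk : Int × Int) :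
    PySem.Dict Int Int × PySem.Dict Int Int :=
  let r := rootD.getD lnk.1 lnk.1
  if PySem.Int.mod lnk.1 2 = 0 then (st.1.insert r (st.1.getD r 0 + 1), st.2)
  else (st.1, st.2.insert r (st.2.getD r 0 + 1))

def get_comb_num_alt (input_list : List (Int × Int)) : Int :=
  let s1 := input_list.foldl pvLink (PySem.Dict.empty, [])
  let rootD := s1.1.items.foldl pvRootStep PySem.Dict.empty
  let st := s1.2.foldl (pvTallyStep rootD) (PySem.Dict.empty, PySem.Dict.empty)
  let total_girls := st.1.values.sum
  let total_boys := st.2.values.sum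
  total_boys * total_girls - (st.1.items.map (fun rg => rg.2 * st.2.getD rg.1 0)).sum

-- ===== PRECONDITION & SPEC =====
def Spec_get_comb_num (input_list : List (Int × Int)) (out : Int) : Prop := out = get_comb_num_alt input_list
instance (input_list : List (Int × Int)) (out : Int) : Decidable (Spec_get_comb_num input_list out) := by unfold Spec_get_comb_num; infer_instance

-- ===== CLAIM (what is proved, stated in full; the proofs are below) =====
def Claim_equal_get_comb_num : Prop := ∀ (input_list : List (Int × Int)), Dom_get_comb_num input_list → Spec_get_comb_num input_list (get_comb_num input_list)

-- ===== LEMMAS AND PROOFS =====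

-- ghost reference used only by the proofs: A's loop with the per-tribe tallies deferred into a
-- flat list of (tribe index, parity) assignment events
def pvRef (st : PySem.Dict Int Nat × Nat × List (Nat × Int)) (ab : Int × Int) :
    PySem.Dict Int Nat × Nat × List (Nat × Int) :=
  match st.1.get? ab.1, st.1.get? ab.2 with
  | none, none =>
      ((st.1.insert ab.1 st.2.1).insert ab.2 st.2.1, st.2.1 + 1,
        st.2.2 ++ [(st.2.1, PySem.Int.mod ab.1 2), (st.2.1, PySem.Int.mod ab.2 2)])
  | none, some tb => (st.1.insert ab.1 tb, st.2.1, st.2.2 ++ [(tb, PySem.Int.mod ab.1 2)])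
  | some ta, none => (st.1.insert ab.2 ta, st.2.1, st.2.2 ++ [(ta, PySem.Int.mod ab.2 2)])
  | some _, some _ => st

-- the per-tribe (girls, boys) table determined by the event list
def pvTally (c : Nat) (ev : List (Nat × Int)) : List (Int × Int) :=
  (List.range c).map (fun t => ((ev.count (t, 0) : Int), (ev.count (t, 1) : Int)))


lemma pvMod2 (a : Int) : PySem.Int.mod a 2 = 0 ∨ PySem.Int.mod a 2 = 1 := by
  have h1 := PySem.Int.mod_nonneg a (b := 2) (by norm_num)
  have h2 := PySem.Int.mod_lt a (b := 2) (by norm_num)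
  omega

lemma pvContains_none {ν : Type} {d : PySem.Dict Int ν} {k : Int} (h : d.get? k = none) :
    d.contains k = false := (PySem.Dict.get?_eq_none_iff_contains d k).mp h

lemma pvContains_some {ν : Type} {d : PySem.Dict Int ν} {k : Int} {v : ν} (h : d.get? k = some v) :
    d.contains k = true := by
  by_cases hc : d.contains k
  · exact hc
  · rw [(PySem.Dict.get?_eq_none_iff_contains d k).mpr (by simpa using hc)] at h; cases h

lemma pvTally_length (c : Nat) (ev : List (Nat × Int)) : (pvTally c ev).length = c := by
  simp [pvTally]

lemma pvTally_modify (c t : Nat) (ev : List (Nat × Int)) (p : Int) (ht : t < c)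
    (hp : p = 0 ∨ p = 1) :
    (pvTally c ev ++ [((0 : Int), (0 : Int))]).modify t (pvBump p)
      = pvTally c (ev ++ [(t, p)]) ++ [((0 : Int), (0 : Int))] := by
  apply List.ext_getElem
  · simp [pvTally]
  · intro j h1 h2
    simp only [List.length_modify, List.length_append, pvTally_length, List.length_cons,
      List.length_nil] at h1 h2
    rw [List.getElem_modify]
    by_cases hj : j < c
    · rw [List.getElem_append_left (by simp [pvTally_length]; omega),
        List.getElem_append_left (by simp [pvTally_length]; omega)]
      simp only [pvTally, List.getElem_map, List.getElem_range]
      rcases hp with hp | hp <;> subst hp <;>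
      · by_cases htj : t = j <;>
          simp [htj, pvBump, List.count_append, Prod.ext_iff]
    · rw [if_neg (by omega),
        List.getElem_append_right (by simp [pvTally_length]; omega),
        List.getElem_append_right (by simp [pvTally_length]; omega)]
      simp [pvTally_length]

lemma pvTally_new (c : Nat) (ev : List (Nat × Int)) (pa pb : Int)
    (h : ∀ e ∈ ev, e.1 < c) (hpa : pa = 0 ∨ pa = 1) (hpb : pb = 0 ∨ pb = 1) :
    ((pvTally c ev ++ [((0 : Int), (0 : Int))]).modify c (pvBump pa)).modify c (pvBump pb)
        ++ [((0 : Int), (0 : Int))]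
      = pvTally (c + 1) (ev ++ [(c, pa), (c, pb)]) ++ [((0 : Int), (0 : Int))] := by
  have hcnt0 : ∀ q : Int, ev.count (c, q) = 0 := by
    intro q
    rw [List.count_eq_zero]
    intro hmem
    exact absurd (h _ hmem) (by simp)
  apply List.ext_getElem
  · simp [pvTally]
  · intro j h1 h2
    simp only [List.length_append, List.length_modify, pvTally_length, List.length_cons,
      List.length_nil] at h1 h2
    by_cases hj : j < c + 1
    · rw [List.getElem_append_left (by simp [pvTally_length]; omega),
        List.getElem_append_left (by simp [pvTally_length]; omega),
        List.getElem_modify, List.getElem_modify]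
      by_cases hjc : j < c
      · rw [if_neg (by omega), if_neg (by omega),
          List.getElem_append_left (by simp [pvTally_length]; omega)]
        simp only [pvTally, List.getElem_map, List.getElem_range]
        simp [List.count_append, Prod.ext_iff, show ¬ (c = j) by omega]
      · rw [if_pos (by omega), if_pos (by omega),
          List.getElem_append_right (by simp [pvTally_length]; omega)]
        have hj' : j = c := by omega
        subst hj'
        simp only [pvTally, List.getElem_map, List.getElem_range]
        rcases hpa with hpa | hpa <;> rcases hpb with hpb | hpb <;> subst hpa <;> subst hpb <;>
          simp [pvBump, List.count_append, hcnt0, Prod.ext_iff]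
    · rw [List.getElem_append_right (by simp [pvTally_length]; omega),
        List.getElem_append_right (by simp [pvTally_length]; omega)]
      simp [pvTally_length]

-- the loop invariant: A's running state is the reference state with the tallies deferred
lemma pvLoop : ∀ (l : List (Int × Int)) (d : PySem.Dict Int Nat) (c : Nat)
    (ev : List (Nat × Int)),
    (∀ e ∈ ev, e.1 < c ∧ (e.2 = 0 ∨ e.2 = 1)) →
    (∀ k v, d.get? k = some v → v < c) →
    (∀ e ∈ (l.foldl pvRef (d, c, ev)).2.2,
        e.1 < (l.foldl pvRef (d, c, ev)).2.1 ∧ (e.2 = 0 ∨ e.2 = 1)) ∧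
    l.foldl pvStepA (d, c, pvTally c ev ++ [((0 : Int), (0 : Int))]) =
      ((l.foldl pvRef (d, c, ev)).1, (l.foldl pvRef (d, c, ev)).2.1,
        pvTally (l.foldl pvRef (d, c, ev)).2.1 (l.foldl pvRef (d, c, ev)).2.2
          ++ [((0 : Int), (0 : Int))]) := by
  intro l
  induction l with
  | nil => intro d c ev hev hd; exact ⟨hev, rfl⟩
  | cons ab l ih =>
    intro d c ev hev hd
    simp only [List.foldl_cons]
    rcases ha : d.get? ab.1 with _ | ta <;> rcases hb : d.get? ab.2 with _ | tb
    · -- both endpoints new: fresh tribe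
      have hB : pvRef (d, c, ev) ab = ((d.insert ab.1 c).insert ab.2 c, c + 1,
          ev ++ [(c, PySem.Int.mod ab.1 2), (c, PySem.Int.mod ab.2 2)]) := by
        simp [pvRef, ha, hb]
      have hA : pvStepA (d, c, pvTally c ev ++ [((0 : Int), (0 : Int))]) ab =
          ((d.insert ab.1 c).insert ab.2 c, c + 1,
            pvTally (c + 1) (ev ++ [(c, PySem.Int.mod ab.1 2), (c, PySem.Int.mod ab.2 2)])
              ++ [((0 : Int), (0 : Int))]) := by
        simp only [pvStepA, pvContains_none ha, pvContains_none hb, Bool.not_false,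
          Bool.and_self, if_true]
        rw [pvTally_new c ev _ _ (fun e he => (hev e he).1) (pvMod2 ab.1) (pvMod2 ab.2)]
      rw [hA, hB]
      apply ih
      · intro e he
        rcases List.mem_append.mp he with he | he
        · exact ⟨Nat.lt_succ_of_lt (hev e he).1, (hev e he).2⟩
        · have he' : e = (c, PySem.Int.mod ab.1 2) ∨ e = (c, PySem.Int.mod ab.2 2) := by
            simpa using he
          rcases he' with he' | he' <;> subst he' <;> exact ⟨Nat.lt_succ_self c, pvMod2 _⟩
      · intro k v hk
        rw [PySem.Dict.get?_insert, PySem.Dict.get?_insert] at hk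
        split_ifs at hk with h1 h2
        · injection hk with hk; omega
        · injection hk with hk; omega
        · exact Nat.lt_succ_of_lt (hd k v hk)
    · -- a new, b known
      have htb : tb < c := hd _ _ hb
      have hgd : d.getD ab.2 0 = tb := by
        rw [PySem.Dict.getD_eq_get?_getD, hb]; rfl
      have hB : pvRef (d, c, ev) ab = (d.insert ab.1 tb, c,
          ev ++ [(tb, PySem.Int.mod ab.1 2)]) := by
        simp [pvRef, ha, hb]
      have hA : pvStepA (d, c, pvTally c ev ++ [((0 : Int), (0 : Int))]) ab =
          (d.insert ab.1 tb, c,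
            pvTally c (ev ++ [(tb, PySem.Int.mod ab.1 2)]) ++ [((0 : Int), (0 : Int))]) := by
        simp only [pvStepA, pvContains_none ha, pvContains_some hb, Bool.not_false,
          Bool.not_true, Bool.and_false, hgd, if_true]
        rw [pvTally_modify c tb ev _ htb (pvMod2 ab.1)]
        simp
      rw [hA, hB]
      apply ih
      · intro e he
        rcases List.mem_append.mp he with he | he
        · exact hev e he
        · have he' : e = (tb, PySem.Int.mod ab.1 2) := by simpa using he
          subst he'; exact ⟨htb, pvMod2 _⟩
      · intro k v hk
        rw [PySem.Dict.get?_insert] at hk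
        split_ifs at hk with h1
        · injection hk with hk; omega
        · exact hd k v hk
    · -- b new, a known
      have hta : ta < c := hd _ _ ha
      have hgd : d.getD ab.1 0 = ta := by
        rw [PySem.Dict.getD_eq_get?_getD, ha]; rfl
      have hB : pvRef (d, c, ev) ab = (d.insert ab.2 ta, c,
          ev ++ [(ta, PySem.Int.mod ab.2 2)]) := by
        simp [pvRef, ha, hb]
      have hA : pvStepA (d, c, pvTally c ev ++ [((0 : Int), (0 : Int))]) ab =
          (d.insert ab.2 ta, c,
            pvTally c (ev ++ [(ta, PySem.Int.mod ab.2 2)]) ++ [((0 : Int), (0 : Int))]) := by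
        simp only [pvStepA, pvContains_none hb, pvContains_some ha, Bool.not_false,
          Bool.not_true, Bool.false_and, hgd, if_true]
        rw [pvTally_modify c ta ev _ hta (pvMod2 ab.2)]
        simp
      rw [hA, hB]
      apply ih
      · intro e he
        rcases List.mem_append.mp he with he | he
        · exact hev e he
        · have he' : e = (ta, PySem.Int.mod ab.2 2) := by simpa using he
          subst he'; exact ⟨hta, pvMod2 _⟩
      · intro k v hk
        rw [PySem.Dict.get?_insert] at hk
        split_ifs at hk with h1
        · injection hk with hk; omega
        · exact hd k v hk
    · -- both known: nothing happens
      have hB : pvRef (d, c, ev) ab = (d, c, ev) := by simp [pvRef, ha, hb]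
      have hA : pvStepA (d, c, pvTally c ev ++ [((0 : Int), (0 : Int))]) ab =
          (d, c, pvTally c ev ++ [((0 : Int), (0 : Int))]) := by
        simp [pvStepA, pvContains_some ha, pvContains_some hb]
      rw [hA, hB]
      exact ih d c ev hev hd

lemma pvSumIdent (L : List (Int × Int)) (G : Int) :
    (L.map (fun gb => gb.2 * (G - gb.1))).sum
      = G * (L.map (fun gb => gb.2)).sum - (L.map (fun gb => gb.2 * gb.1)).sum := by
  induction L with
  | nil => simp
  | cons hd tl ih => simp only [List.map_cons, List.sum_cons, ih]; ring

lemma pvSumCount (ev : List (Nat × Int)) (c : Nat) (q : Int) (h : ∀ e ∈ ev, e.1 < c) :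
    ((List.range c).map (fun t => ((ev.count (t, q) : Nat) : Int))).sum
      = ((ev.countP (fun e => e.2 == q) : Nat) : Int) := by
  induction ev with
  | nil => simp
  | cons e ev ih =>
    have he : e.1 < c := h e (List.mem_cons_self)
    have hrest := ih (fun x hx => h x (List.mem_cons_of_mem _ hx))
    have hstep : ((List.range c).map (fun t => (((e :: ev).count (t, q) : Nat) : Int))).sum
        = ((List.range c).map (fun t => ((ev.count (t, q) : Nat) : Int)
            + (if e = (t, q) then (1 : Int) else 0))).sum := by
      apply congrArg
      apply List.map_congr_left
      intro t ht
      rw [List.count_cons]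
      by_cases hc : e = (t, q) <;> simp [hc]
    rw [hstep, List.sum_map_add, hrest, List.countP_cons]
    have hind : ((List.range c).map (fun t => (if e = (t, q) then (1 : Int) else 0))).sum
        = if e.2 == q then (1 : Int) else 0 := by
      by_cases hq : e.2 = q
      · have : ∀ t : Nat, (if e = (t, q) then (1 : Int) else 0)
            = (if (t == e.1) = true then (1 : Int) else 0) := by
          intro t
          by_cases hc : e = (t, q)
          · subst hc; simp
          · rw [if_neg hc, if_neg]
            intro hbe
            exact hc (by cases e; simp_all [Prod.ext_iff, beq_iff_eq])
        rw [List.map_congr_left (fun t _ => this t)]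
        rw [PySem.List.sum_map_ite_one_zero (fun t => t == e.1) (List.range c)]
        have : List.countP (fun t => t == e.1) (List.range c) = List.count e.1 (List.range c) := rfl
        rw [this, List.count_range, if_pos he]
        simp [hq]
      · have : ∀ t : Nat, (if e = (t, q) then (1 : Int) else 0) = 0 := by
          intro t
          rw [if_neg]
          intro hc
          exact hq (by rw [hc])
        rw [List.map_congr_left (fun t _ => this t)]
        simp [hq]
    rw [hind]
    push_cast
    by_cases hq : e.2 = q <;> simp [hq]

lemma pvFinal (n : Nat) (ev : List (Nat × Int))
    (hfst : ∀ e ∈ ev, e.1 < n) (hpar : ∀ e ∈ ev, e.2 = 0 ∨ e.2 = 1) :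
    (pvTally n ev ++ [((0 : Int), (0 : Int))]).foldl
        (fun r gb => r + gb.2 *
          ((((pvTally n ev ++ [((0 : Int), (0 : Int))]).map (fun gb => gb.1)).sum) - gb.1)) 0
      = ((ev.length : Int) - (((ev.filter (fun e => e.2 == 0)).length : Nat) : Int))
            * (((ev.filter (fun e => e.2 == 0)).length : Nat) : Int)
        - ((List.range n).map
            (fun t => ((ev.count (t, 1) : Nat) : Int) * ((ev.count (t, 0) : Nat) : Int))).sum := by
  have hG : (((pvTally n ev ++ [((0 : Int), (0 : Int))]).map (fun gb => gb.1)).sum)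
      = ((ev.countP (fun e => e.2 == 0) : Nat) : Int) := by
    rw [List.map_append, List.sum_append]
    simp only [pvTally, List.map_map, List.map_cons, List.map_nil, List.sum_cons, List.sum_nil]
    rw [show ((fun gb : Int × Int => gb.1) ∘ fun t : Nat =>
        (((ev.count (t, 0) : Nat) : Int), ((ev.count (t, 1) : Nat) : Int)))
        = fun t : Nat => ((ev.count (t, 0) : Nat) : Int) from rfl]
    rw [pvSumCount ev n 0 hfst]
    ring
  have hBt : (((pvTally n ev ++ [((0 : Int), (0 : Int))]).map (fun gb => gb.2)).sum)
      = ((ev.countP (fun e => e.2 == 1) : Nat) : Int) := by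
    rw [List.map_append, List.sum_append]
    simp only [pvTally, List.map_map, List.map_cons, List.map_nil, List.sum_cons, List.sum_nil]
    rw [show ((fun gb : Int × Int => gb.2) ∘ fun t : Nat =>
        (((ev.count (t, 0) : Nat) : Int), ((ev.count (t, 1) : Nat) : Int)))
        = fun t : Nat => ((ev.count (t, 1) : Nat) : Int) from rfl]
    rw [pvSumCount ev n 1 hfst]
    ring
  have hX : (((pvTally n ev ++ [((0 : Int), (0 : Int))]).map (fun gb => gb.2 * gb.1)).sum)
      = ((List.range n).map
          (fun t => ((ev.count (t, 1) : Nat) : Int) * ((ev.count (t, 0) : Nat) : Int))).sum := by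
    rw [List.map_append, List.sum_append]
    simp only [pvTally, List.map_map, List.map_cons, List.map_nil, List.sum_cons, List.sum_nil]
    rw [show ((fun gb : Int × Int => gb.2 * gb.1) ∘ fun t : Nat =>
        (((ev.count (t, 0) : Nat) : Int), ((ev.count (t, 1) : Nat) : Int)))
        = fun t : Nat => ((ev.count (t, 1) : Nat) : Int) * ((ev.count (t, 0) : Nat) : Int)
        from rfl]
    ring
  have hlen : ev.length = ev.countP (fun e => e.2 == 0) + ev.countP (fun e => e.2 == 1) := by
    rw [List.length_eq_countP_add_countP (fun e => e.2 == 0)]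
    congr 1
    apply List.countP_congr
    intro e he
    rcases hpar e he with h2 | h2 <;> simp [h2]
  rw [PySem.List.foldl_add _ (fun gb : Int × Int => gb.2 *
      ((((pvTally n ev ++ [((0 : Int), (0 : Int))]).map (fun gb => gb.1)).sum) - gb.1)) 0]
  rw [pvSumIdent, hG, hBt, hX, ← List.countP_eq_length_filter]
  have h1 : ((ev.countP (fun e => e.2 == 1) : Nat) : Int)
      = (ev.length : Int) - ((ev.countP (fun e => e.2 == 0) : Nat) : Int) := by
    push_cast [hlen]; ring
  rw [h1]
  ring

-- joint invariant tying the reference state (dA, c, ev) to B's forest state (dP, links)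
def pvJ (dA : PySem.Dict Int Nat) (c : Nat) (ev : List (Nat × Int))
    (dP : PySem.Dict Int Int) (links : List (Int × Int)) : Prop :=
  dP.keys.Nodup ∧
  (∀ x, dP.contains x = dA.contains x) ∧
  (∀ x p, dP.get? x = some p → ∃ t, dA.get? x = some t ∧ dA.get? p = some t) ∧
  (∀ i, i < dP.items.length → (dP.items.getD i (0, 0)).2 = (dP.items.getD i (0, 0)).1 ∨
      ∃ j, j < i ∧ (dP.items.getD j (0, 0)).1 = (dP.items.getD i (0, 0)).2) ∧
  (∀ r1 r2 t, dP.get? r1 = some r1 → dP.get? r2 = some r2 →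
      dA.get? r1 = some t → dA.get? r2 = some t → r1 = r2) ∧
  (∀ k v, dA.get? k = some v → v < c) ∧
  (links.length = ev.length ∧
    ∀ i, i < links.length →
      dA.get? (links.getD i (0, 0)).1 = some (ev.getD i (0, 0)).1 ∧
      (ev.getD i (0, 0)).2 = PySem.Int.mod (links.getD i (0, 0)).1 2)

lemma pvMemKeysIdx {ν : Type} (d : PySem.Dict Int ν) (y : Int) (d0 : Int × ν)
    (h : d.contains y = true) :
    ∃ j, j < d.items.length ∧ (d.items.getD j d0).1 = y := by
  have hy : y ∈ d.keys := (PySem.Dict.contains_iff_mem_keys d y).mp h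
  simp only [PySem.Dict.keys] at hy
  obtain ⟨p, hp, hpy⟩ := List.mem_map.mp hy
  obtain ⟨j, hj, hje⟩ := List.getElem_of_mem hp
  exact ⟨j, hj, by rw [List.getD_eq_getElem _ _ hj, hje, hpy]⟩

lemma pvJ_join (dA : PySem.Dict Int Nat) (c : Nat) (ev : List (Nat × Int))
    (dP : PySem.Dict Int Int) (links : List (Int × Int)) (x y : Int) (t : Nat)
    (hJ : pvJ dA c ev dP links) (hx : dA.get? x = none) (hy : dA.get? y = some t) :
    pvJ (dA.insert x t) c (ev ++ [(t, PySem.Int.mod x 2)])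
      (dP.insert x y) (links ++ [(x, y)]) := by
  obtain ⟨hN, hK, hT, hW, hU, hV, hlen, hE⟩ := hJ
  have hxy : x ≠ y := by intro h; rw [h, hy] at hx; cases hx
  have hxP : dP.contains x = false := by rw [hK]; exact pvContains_none hx
  have hyP : dP.contains y = true := by rw [hK]; exact pvContains_some hy
  have hxK : x ∉ dP.keys := by
    intro hm
    rw [(PySem.Dict.contains_iff_mem_keys dP x).mpr hm] at hxP
    cases hxP
  have hitems : (dP.insert x y).items = dP.items ++ [(x, y)] :=
    PySem.Dict.items_insert_of_not_contains dP y hxP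
  have hkeys : (dP.insert x y).keys = dP.keys ++ [x] :=
    PySem.Dict.keys_insert_of_not_contains dP y hxP
  have hgetD : ∀ j, j < dP.items.length →
      (dP.items ++ [(x, y)]).getD j (0, 0) = dP.items.getD j (0, 0) := by
    intro j hj
    rw [List.getD_eq_getElem _ _ (by simp; omega), List.getElem_append_left hj,
      List.getD_eq_getElem _ _ hj]
  refine ⟨?_, ?_, ?_, ?_, ?_, ?_, ?_, ?_⟩
  · rw [hkeys]
    refine List.Nodup.append hN (List.nodup_singleton x) ?_
    intro z hz hz2
    rw [List.mem_singleton] at hz2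
    subst hz2
    exact hxK hz
  · intro z
    rw [PySem.Dict.contains_insert, PySem.Dict.contains_insert, hK]
  · intro z p hzp
    rw [PySem.Dict.get?_insert] at hzp
    by_cases hzx : z = x
    · rw [if_pos hzx] at hzp
      injection hzp with hzp
      subst hzp; subst hzx
      exact ⟨t, by rw [PySem.Dict.get?_insert, if_pos rfl],
        by rw [PySem.Dict.get?_insert, if_neg (fun h => hxy h.symm)]; exact hy⟩
    · rw [if_neg hzx] at hzp
      obtain ⟨t', h1, h2⟩ := hT z p hzp
      have hpx : p ≠ x := by intro h; subst h; rw [hx] at h2; cases h2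
      exact ⟨t', by rw [PySem.Dict.get?_insert, if_neg hzx]; exact h1,
        by rw [PySem.Dict.get?_insert, if_neg hpx]; exact h2⟩
  · intro i hi
    rw [hitems] at hi ⊢
    simp only [List.length_append, List.length_cons, List.length_nil] at hi
    by_cases hil : i < dP.items.length
    · rcases hW i hil with h | ⟨j, hj, hje⟩
      · left; rw [hgetD i hil]; exact h
      · right; exact ⟨j, hj, by rw [hgetD j (lt_trans hj hil), hgetD i hil]; exact hje⟩
    · have hieq : i = dP.items.length := by omega
      have hlast : (dP.items ++ [(x, y)]).getD i (0, 0) = (x, y) := by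
        subst hieq
        rw [List.getD_eq_getElem _ _ (by simp)]
        simp
      obtain ⟨j, hj, hje⟩ := pvMemKeysIdx dP y (0, 0) hyP
      right
      refine ⟨j, by omega, ?_⟩
      rw [hlast, hgetD j hj]
      exact hje
  · intro r1 r2 t' h1 h2 h3 h4
    rw [PySem.Dict.get?_insert] at h1 h2
    have hr1 : r1 ≠ x := by
      intro h
      rw [if_pos h] at h1
      injection h1 with h1
      rw [h] at h1
      exact hxy h1.symm
    have hr2 : r2 ≠ x := by
      intro h
      rw [if_pos h] at h2
      injection h2 with h2
      rw [h] at h2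
      exact hxy h2.symm
    rw [if_neg hr1] at h1
    rw [if_neg hr2] at h2
    rw [PySem.Dict.get?_insert, if_neg hr1] at h3
    rw [PySem.Dict.get?_insert, if_neg hr2] at h4
    exact hU r1 r2 t' h1 h2 h3 h4
  · intro k v hk
    rw [PySem.Dict.get?_insert] at hk
    split_ifs at hk with h
    · injection hk with hk; subst hk; exact hV y t hy
    · exact hV k v hk
  · simp [hlen]
  · intro i hi
    simp only [List.length_append, List.length_cons, List.length_nil] at hi
    by_cases hil : i < links.length
    · have h1 : (links ++ [(x, y)]).getD i (0, 0) = links.getD i (0, 0) := by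
        rw [List.getD_eq_getElem _ _ (by simp; omega), List.getElem_append_left hil,
          List.getD_eq_getElem _ _ hil]
      have h2 : (ev ++ [(t, PySem.Int.mod x 2)]).getD i (0, 0) = ev.getD i (0, 0) := by
        rw [List.getD_eq_getElem _ _ (by simp; omega),
          List.getElem_append_left (by omega : i < ev.length),
          List.getD_eq_getElem _ _ (by omega)]
      obtain ⟨hE1, hE2⟩ := hE i hil
      have hne : (links.getD i (0, 0)).1 ≠ x := by
        intro h; rw [h, hx] at hE1; cases hE1
      rw [h1, h2, PySem.Dict.get?_insert, if_neg hne]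
      exact ⟨hE1, hE2⟩
    · have hieq : i = links.length := by omega
      have h1 : (links ++ [(x, y)]).getD i (0, 0) = (x, y) := by
        subst hieq; rw [List.getD_eq_getElem _ _ (by simp)]; simp
      have h2 : (ev ++ [(t, PySem.Int.mod x 2)]).getD i (0, 0) = (t, PySem.Int.mod x 2) := by
        rw [List.getD_eq_getElem _ _ (by simp; omega)]
        have : i = ev.length := by omega
        subst this
        simp
      rw [h1, h2, PySem.Dict.get?_insert, if_pos rfl]
      exact ⟨rfl, rfl⟩

lemma pvJ_fresh (dA : PySem.Dict Int Nat) (c : Nat) (ev : List (Nat × Int))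
    (dP : PySem.Dict Int Int) (links : List (Int × Int)) (a b : Int)
    (hJ : pvJ dA c ev dP links) (ha : dA.get? a = none) (hb : dA.get? b = none) :
    pvJ ((dA.insert a c).insert b c) (c + 1)
      (ev ++ [(c, PySem.Int.mod a 2), (c, PySem.Int.mod b 2)])
      ((dP.insert a a).insert b a) (links ++ [(a, a), (b, a)]) := by
  obtain ⟨hN, hK, hT, hW, hU, hV, hlen, hE⟩ := hJ
  have haP : dP.contains a = false := by rw [hK]; exact pvContains_none ha
  have hbP : dP.contains b = false := by rw [hK]; exact pvContains_none hb
  have haK : a ∉ dP.keys := by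
    intro hm
    rw [(PySem.Dict.contains_iff_mem_keys dP a).mpr hm] at haP
    cases haP
  have hbK : b ∉ dP.keys := by
    intro hm
    rw [(PySem.Dict.contains_iff_mem_keys dP b).mpr hm] at hbP
    cases hbP
  -- lookups in the two updated dicts
  have hgP : ∀ z, ((dP.insert a a).insert b a).get? z =
      if z = b then some a else if z = a then some a else dP.get? z := by
    intro z
    rw [PySem.Dict.get?_insert, PySem.Dict.get?_insert]
  have hgA : ∀ z, ((dA.insert a c).insert b c).get? z =
      if z = b then some c else if z = a then some c else dA.get? z := by
    intro z
    rw [PySem.Dict.get?_insert, PySem.Dict.get?_insert]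
  have hitems : a ≠ b → ((dP.insert a a).insert b a).items = dP.items ++ [(a, a), (b, a)] := by
    intro hab
    have h1 : (dP.insert a a).items = dP.items ++ [(a, a)] :=
      PySem.Dict.items_insert_of_not_contains dP a haP
    have hb2 : (dP.insert a a).contains b = false := by
      rw [PySem.Dict.contains_insert]
      simp only [Bool.or_eq_false_iff]
      exact ⟨by simp; exact fun h => hab h.symm, hbP⟩
    rw [PySem.Dict.items_insert_of_not_contains _ a hb2, h1, List.append_assoc]
    rfl
  have hitemsEq : a = b → ((dP.insert a a).insert b a).items = dP.items ++ [(a, a)] := by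
    intro hab
    subst hab
    rw [PySem.Dict.insert_insert_self]
    exact PySem.Dict.items_insert_of_not_contains dP a haP
  refine ⟨?_, ?_, ?_, ?_, ?_, ?_, ?_, ?_⟩
  · by_cases hab : a = b
    · subst hab
      rw [PySem.Dict.insert_insert_self, PySem.Dict.keys_insert_of_not_contains dP a haP]
      refine List.Nodup.append hN (List.nodup_singleton a) ?_
      intro z hz hz2
      rw [List.mem_singleton] at hz2
      subst hz2
      exact haK hz
    · have hk2 : ((dP.insert a a).insert b a).keys = dP.keys ++ [a, b] := by
        have h0 : ((dP.insert a a).insert b a).keys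
            = ((dP.insert a a).insert b a).items.map (·.1) := rfl
        rw [h0, hitems hab, List.map_append]
        rfl
      rw [hk2]
      refine List.Nodup.append hN ?_ ?_
      · exact List.nodup_cons.mpr ⟨by simp [hab], List.nodup_singleton b⟩
      · intro z hz hz2
        rcases List.mem_cons.mp hz2 with h | h
        · subst h; exact haK hz
        · rw [List.mem_singleton] at h; subst h; exact hbK hz
  · intro z
    rw [PySem.Dict.contains_insert, PySem.Dict.contains_insert,
      PySem.Dict.contains_insert, PySem.Dict.contains_insert, hK]
  · intro z p hzp
    rw [hgP] at hzp
    by_cases hzb : z = b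
    · rw [if_pos hzb] at hzp
      injection hzp with hzp
      subst hzp
      refine ⟨c, ?_, ?_⟩
      · rw [hgA, if_pos hzb]
      · rw [hgA]
        by_cases hab : a = b
        · rw [if_pos hab]
        · rw [if_neg hab, if_pos rfl]
    · rw [if_neg hzb] at hzp
      by_cases hza : z = a
      · rw [if_pos hza] at hzp
        injection hzp with hzp
        subst hzp
        subst hza
        refine ⟨c, ?_, ?_⟩ <;> rw [hgA, if_neg hzb, if_pos rfl]
      · rw [if_neg hza] at hzp
        obtain ⟨t', h1, h2⟩ := hT z p hzp
        have hpa : p ≠ a := by intro h; subst h; rw [ha] at h2; cases h2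
        have hpb : p ≠ b := by intro h; subst h; rw [hb] at h2; cases h2
        exact ⟨t', by rw [hgA, if_neg hzb, if_neg hza]; exact h1,
          by rw [hgA, if_neg hpb, if_neg hpa]; exact h2⟩
  · intro i hi
    by_cases hab : a = b
    · rw [hitemsEq hab] at hi ⊢
      simp only [List.length_append, List.length_cons, List.length_nil] at hi
      by_cases hil : i < dP.items.length
      · rcases hW i hil with h | ⟨j, hj, hje⟩
        · left
          rw [List.getD_append _ _ _ i hil]
          exact h
        · right
          exact ⟨j, hj, by
            rw [List.getD_append _ _ _ j (lt_trans hj hil), List.getD_append _ _ _ i hil]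
            exact hje⟩
      · left
        rw [List.getD_append_right _ _ _ _ (by omega), show i - dP.items.length = 0 by omega]
        rfl
    · rw [hitems hab] at hi ⊢
      simp only [List.length_append, List.length_cons, List.length_nil] at hi
      by_cases hil : i < dP.items.length
      · have hgd : ∀ j, j < dP.items.length →
            (dP.items ++ [(a, a), (b, a)]).getD j (0, 0) = dP.items.getD j (0, 0) := by
          intro j hj
          rw [List.getD_append _ _ _ j hj]
        rcases hW i hil with h | ⟨j, hj, hje⟩
        · left; rw [hgd i hil]; exact h
        · right; exact ⟨j, hj, by rw [hgd j (lt_trans hj hil), hgd i hil]; exact hje⟩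
      · by_cases hieq : i = dP.items.length
        · left
          subst hieq
          rw [List.getD_append_right _ _ _ _ (le_refl _), Nat.sub_self]
          rfl
        · have g1 : (dP.items ++ [(a, a), (b, a)]).getD dP.items.length (0, 0) = (a, a) := by
            rw [List.getD_append_right _ _ _ _ (le_refl _), Nat.sub_self]
            rfl
          have g2 : (dP.items ++ [(a, a), (b, a)]).getD i (0, 0) = (b, a) := by
            rw [List.getD_append_right _ _ _ _ (by omega),
              show i - dP.items.length = 1 by omega]
            rfl
          right
          exact ⟨dP.items.length, by omega, by rw [g1, g2]⟩
  · intro r1 r2 t' h1 h2 h3 h4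
    rw [hgP] at h1 h2
    rw [hgA] at h3 h4
    have key : ∀ r, (if r = b then some a else if r = a then some a else dP.get? r) = some r →
        (if r = b then some c else if r = a then some c else dA.get? r) = some t' →
        (r = a ∧ t' = c) ∨ (dP.get? r = some r ∧ dA.get? r = some t') := by
      intro r hr ht
      by_cases hrb : r = b
      · rw [if_pos hrb] at hr ht
        injection hr with hr
        injection ht with ht
        exact Or.inl ⟨hr.symm, ht.symm⟩
      · rw [if_neg hrb] at hr ht
        by_cases hra : r = a
        · rw [if_pos hra] at ht
          injection ht with ht
          exact Or.inl ⟨hra, ht.symm⟩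
        · rw [if_neg hra] at hr ht
          exact Or.inr ⟨hr, ht⟩
    rcases key r1 h1 h3 with ⟨hr1, htc1⟩ | ⟨hr1, ht1⟩ <;>
      rcases key r2 h2 h4 with ⟨hr2, htc2⟩ | ⟨hr2, ht2⟩
    · rw [hr1, hr2]
    · have := hV r2 t' ht2; omega
    · have := hV r1 t' ht1; omega
    · exact hU r1 r2 t' hr1 hr2 ht1 ht2
  · intro k v hk
    rw [hgA] at hk
    split_ifs at hk with h1 h2
    · injection hk with hk; omega
    · injection hk with hk; omega
    · exact Nat.lt_succ_of_lt (hV k v hk)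
  · simp [hlen]
  · intro i hi
    simp only [List.length_append, List.length_cons, List.length_nil] at hi
    by_cases hil : i < links.length
    · have h1 : (links ++ [(a, a), (b, a)]).getD i (0, 0) = links.getD i (0, 0) :=
        List.getD_append _ _ _ i hil
      have h2 : (ev ++ [(c, PySem.Int.mod a 2), (c, PySem.Int.mod b 2)]).getD i (0, 0)
          = ev.getD i (0, 0) := List.getD_append _ _ _ i (by omega)
      obtain ⟨hE1, hE2⟩ := hE i hil
      have hna : (links.getD i (0, 0)).1 ≠ a := by
        intro h; rw [h, ha] at hE1; cases hE1
      have hnb : (links.getD i (0, 0)).1 ≠ b := by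
        intro h; rw [h, hb] at hE1; cases hE1
      rw [h1, h2, hgA, if_neg hnb, if_neg hna]
      exact ⟨hE1, hE2⟩
    · by_cases hieq : i = links.length
      · have h1 : (links ++ [(a, a), (b, a)]).getD i (0, 0) = (a, a) := by
          subst hieq
          rw [List.getD_append_right _ _ _ _ (le_refl _), Nat.sub_self]
          rfl
        have h2 : (ev ++ [(c, PySem.Int.mod a 2), (c, PySem.Int.mod b 2)]).getD i (0, 0)
            = (c, PySem.Int.mod a 2) := by
          rw [List.getD_append_right _ _ _ _ (by omega), show i - ev.length = 0 by omega]
          rfl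
        rw [h1, h2, hgA]
        refine ⟨?_, rfl⟩
        by_cases hab : a = b
        · rw [if_pos hab]
        · rw [if_neg hab, if_pos rfl]
      · have hieq2 : i = links.length + 1 := by omega
        have h1 : (links ++ [(a, a), (b, a)]).getD i (0, 0) = (b, a) := by
          rw [List.getD_append_right _ _ _ _ (by omega), show i - links.length = 1 by omega]
          rfl
        have h2 : (ev ++ [(c, PySem.Int.mod a 2), (c, PySem.Int.mod b 2)]).getD i (0, 0)
            = (c, PySem.Int.mod b 2) := by
          rw [List.getD_append_right _ _ _ _ (by omega), show i - ev.length = 1 by omega]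
          rfl
        rw [h1, h2, hgA, if_pos rfl]
        exact ⟨rfl, rfl⟩

lemma pvJoint : ∀ (l : List (Int × Int)) (dA : PySem.Dict Int Nat) (c : Nat)
    (ev : List (Nat × Int)) (dP : PySem.Dict Int Int) (links : List (Int × Int)),
    pvJ dA c ev dP links →
    pvJ (l.foldl pvRef (dA, c, ev)).1 (l.foldl pvRef (dA, c, ev)).2.1
      (l.foldl pvRef (dA, c, ev)).2.2
      (l.foldl pvLink (dP, links)).1 (l.foldl pvLink (dP, links)).2 := by
  intro l
  induction l with
  | nil => intro dA c ev dP links hJ; exact hJ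
  | cons ab l ih =>
    intro dA c ev dP links hJ
    have hK := hJ.2.1
    simp only [List.foldl_cons]
    rcases ha : dA.get? ab.1 with _ | ta <;> rcases hb : dA.get? ab.2 with _ | tb
    · have hL : pvLink (dP, links) ab = ((dP.insert ab.1 ab.1).insert ab.2 ab.1,
          links ++ [(ab.1, ab.1), (ab.2, ab.1)]) := by
        simp [pvLink, hK, pvContains_none ha, pvContains_none hb]
      have hR : pvRef (dA, c, ev) ab = ((dA.insert ab.1 c).insert ab.2 c, c + 1,
          ev ++ [(c, PySem.Int.mod ab.1 2), (c, PySem.Int.mod ab.2 2)]) := by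
        simp [pvRef, ha, hb]
      rw [hL, hR]
      exact ih _ _ _ _ _ (pvJ_fresh dA c ev dP links ab.1 ab.2 hJ ha hb)
    · have hL : pvLink (dP, links) ab = (dP.insert ab.1 ab.2, links ++ [(ab.1, ab.2)]) := by
        simp [pvLink, hK, pvContains_none ha, pvContains_some hb]
      have hR : pvRef (dA, c, ev) ab = (dA.insert ab.1 tb, c,
          ev ++ [(tb, PySem.Int.mod ab.1 2)]) := by
        simp [pvRef, ha, hb]
      rw [hL, hR]
      exact ih _ _ _ _ _ (pvJ_join dA c ev dP links ab.1 ab.2 tb hJ ha hb)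
    · have hL : pvLink (dP, links) ab = (dP.insert ab.2 ab.1, links ++ [(ab.2, ab.1)]) := by
        simp [pvLink, hK, pvContains_some ha, pvContains_none hb]
      have hR : pvRef (dA, c, ev) ab = (dA.insert ab.2 ta, c,
          ev ++ [(ta, PySem.Int.mod ab.2 2)]) := by
        simp [pvRef, ha, hb]
      rw [hL, hR]
      exact ih _ _ _ _ _ (pvJ_join dA c ev dP links ab.2 ab.1 ta hJ hb ha)
    · have hL : pvLink (dP, links) ab = (dP, links) := by
        simp [pvLink, hK, pvContains_some ha, pvContains_some hb]
      have hR : pvRef (dA, c, ev) ab = (dA, c, ev) := by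
        simp [pvRef, ha, hb]
      rw [hL, hR]
      exact ih _ _ _ _ _ hJ

lemma pvRootStep_get? (d : PySem.Dict Int Int) (e : Int × Int) (z : Int) :
    (pvRootStep d e).get? z
      = if z = e.1 then some (if e.2 = e.1 then e.1 else d.getD e.2 e.2) else d.get? z := by
  unfold pvRootStep
  rw [PySem.Dict.get?_insert]

-- pass 2 of B: the in-order sweep resolves every node to a self-parented root of its tree
lemma pvRootSweep (dP : PySem.Dict Int Int) (dA : PySem.Dict Int Nat)
    (hN : dP.keys.Nodup)
    (hT : ∀ x p, dP.get? x = some p → ∃ t, dA.get? x = some t ∧ dA.get? p = some t)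
    (hW : ∀ i, i < dP.items.length → (dP.items.getD i (0, 0)).2 = (dP.items.getD i (0, 0)).1 ∨
        ∃ j, j < i ∧ (dP.items.getD j (0, 0)).1 = (dP.items.getD i (0, 0)).2) :
    ∀ k, k ≤ dP.items.length → ∀ x p, (x, p) ∈ dP.items.take k →
      ∃ r, ((dP.items.take k).foldl pvRootStep PySem.Dict.empty).get? x = some r ∧
        dP.get? r = some r ∧ (∀ t, dA.get? x = some t → dA.get? r = some t) := by
  intro k
  induction k with
  | zero => intro _ x p hm; simp at hm
  | succ k ih =>
    intro hk x p hm
    have hklt : k < dP.items.length := by omega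
    have htake : dP.items.take (k + 1) = dP.items.take k ++ [dP.items[k]] := by
      rw [List.take_add_one, List.getElem?_eq_getElem hklt]
      rfl
    have hkeys : dP.keys = dP.items.map (·.1) := rfl
    have hfresh : (dP.items[k]).1 ∉ (dP.items.take k).map (·.1) := by
      intro hmem
      obtain ⟨q, hq, hq1⟩ := List.mem_map.mp hmem
      obtain ⟨j, hj, hje⟩ := List.getElem_of_mem hq
      have hjk : j < k := by
        have := List.length_take_le k dP.items
        omega
      have : dP.keys[j]'(by rw [hkeys]; simp; omega) = dP.keys[k]'(by rw [hkeys]; simp; omega) := by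
        simp only [hkeys, List.getElem_map]
        rw [← List.getElem_take (j := k) (h := by simp; omega)]
        rw [hje, hq1]
      rw [hN.getElem_inj_iff] at this
      omega
    have hfoldl : (dP.items.take (k + 1)).foldl pvRootStep PySem.Dict.empty
        = pvRootStep ((dP.items.take k).foldl pvRootStep PySem.Dict.empty) (dP.items[k]) := by
      rw [htake, List.foldl_append]
      rfl
    rw [htake] at hm
    rcases List.mem_append.mp hm with hm | hm
    · -- x was processed earlier: its entry is untouched by this insert
      obtain ⟨r, hr1, hr2, hr3⟩ := ih (by omega) x p hm
      have hxne : x ≠ (dP.items[k]).1 := by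
        intro h
        apply hfresh
        rw [← h]
        exact List.mem_map.mpr ⟨(x, p), hm, rfl⟩
      refine ⟨r, ?_, hr2, hr3⟩
      rw [hfoldl, pvRootStep_get?, if_neg hxne]
      exact hr1
    · -- x is the node processed at step k
      have hxp : (x, p) = dP.items[k] := by simpa using hm
      have hgetk : dP.get? x = some p := by
        apply PySem.Dict.get?_of_mem_items dP _ hN
        rw [hxp]
        exact List.getElem_mem hklt
      have hgd : dP.items.getD k (0, 0) = (x, p) := by
        rw [List.getD_eq_getElem _ _ hklt, ← hxp]
      by_cases hself : p = x
      · refine ⟨x, ?_, by rw [← hself] at hgetk ⊢; exact hgetk, fun t ht => ht⟩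
        rw [hfoldl, pvRootStep_get?, ← hxp, if_pos rfl, if_pos hself]
      · -- parent p occurs at an earlier position j < k
        rcases hW k hklt with h | ⟨j, hj, hje⟩
        · rw [hgd] at h
          exact absurd h hself
        · rw [hgd] at hje
          have hjlen : j < dP.items.length := by omega
          have hjmem : dP.items[j] ∈ dP.items.take k := by
            rw [← List.getElem_take (j := k) (h := by simp; omega)]
            exact List.getElem_mem _
          have hpj : (p, (dP.items[j]).2) ∈ dP.items.take k := by
            have hj1 : (dP.items[j]).1 = p := by
              rw [List.getD_eq_getElem _ _ hjlen] at hje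
              exact hje
            rw [← hj1]
            simpa using hjmem
          obtain ⟨rp, hrp1, hrp2, hrp3⟩ := ih (by omega) p _ hpj
          refine ⟨rp, ?_, hrp2, ?_⟩
          · rw [hfoldl, pvRootStep_get?, ← hxp, if_pos rfl, if_neg hself,
              PySem.Dict.getD_eq_get?_getD, hrp1]
            rfl
          · intro t ht
            obtain ⟨t', h1, h2⟩ := hT x p hgetk
            rw [ht] at h1
            injection h1 with h1
            subst h1
            exact hrp3 t h2

-- pass 3 of B: the single loop with two counter dicts is two counter folds over filtered lists
lemma pvTallySplit (rootD : PySem.Dict Int Int) :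
    ∀ (L : List (Int × Int)) (g b : PySem.Dict Int Int),
      L.foldl (pvTallyStep rootD) (g, b) =
        (((L.filter (fun l => decide (PySem.Int.mod l.1 2 = 0))).map
            (fun l => rootD.getD l.1 l.1)).foldl (fun d k => d.insert k (d.getD k 0 + 1)) g,
         ((L.filter (fun l => !decide (PySem.Int.mod l.1 2 = 0))).map
            (fun l => rootD.getD l.1 l.1)).foldl (fun d k => d.insert k (d.getD k 0 + 1)) b) := by
  intro L
  induction L with
  | nil => intro g b; rfl
  | cons l L ihL =>
    intro g b
    by_cases hp : PySem.Int.mod l.1 2 = 0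
    · have hstep : pvTallyStep rootD (g, b) l
          = (g.insert (rootD.getD l.1 l.1) (g.getD (rootD.getD l.1 l.1) 0 + 1), b) := by
        unfold pvTallyStep
        rw [if_pos hp]
      simp only [List.foldl_cons, hstep, List.filter_cons, hp]
      simp only [decide_true, if_pos, Bool.not_true, List.map_cons, List.foldl_cons]
      exact ihL _ _
    · have hstep : pvTallyStep rootD (g, b) l
          = (g, b.insert (rootD.getD l.1 l.1) (b.getD (rootD.getD l.1 l.1) 0 + 1)) := by
        unfold pvTallyStep
        rw [if_neg hp]
      simp only [List.foldl_cons, hstep, List.filter_cons, hp]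
      simp only [decide_false, Bool.not_false]
      exact ihL _ _

-- a counter dict's values sum to the length of the counted list
lemma pvSumCountsCover (ks : List Int) (xs : List Int) (hnd : ks.Nodup)
    (hcov : ∀ x ∈ xs, x ∈ ks) :
    (ks.map (fun k => ((xs.count k : Nat) : Int))).sum = (xs.length : Int) := by
  induction xs with
  | nil => simp
  | cons x xs ih =>
    have hstep : ∀ k : Int, (((x :: xs).count k : Nat) : Int)
        = ((xs.count k : Nat) : Int) + (if (x == k) = true then (1 : Int) else 0) := by
      intro k
      rw [List.count_cons]
      by_cases h : x = k <;> simp [h]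
    rw [List.map_congr_left (fun k _ => hstep k), PySem.List.sum_map_add_int,
      ih (fun z hz => hcov z (List.mem_cons_of_mem _ hz)),
      PySem.List.sum_map_ite_one_zero (fun k => x == k) ks]
    have hone : ks.countP (fun k => x == k) = 1 := by
      have : ks.countP (fun k => x == k) = ks.count x := by
        rw [List.count_eq_countP]
        apply List.countP_congr
        intro z _
        simp only [beq_iff_eq]
        exact eq_comm
      rw [this]
      exact List.count_eq_one_of_mem hnd (hcov x List.mem_cons_self)
    rw [hone]
    simp only [List.length_cons]
    push_cast
    ring

-- counting through a map that is injective at k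
lemma pvCountMapInj {α β : Type} [BEq α] [LawfulBEq α] [BEq β] [LawfulBEq β]
    (l : List α) (σ : α → β) (k : α)
    (hinj : ∀ a ∈ l, σ a = σ k → a = k) :
    (l.map σ).count (σ k) = l.count k := by
  rw [List.count_eq_countP, List.count_eq_countP, List.countP_map]
  apply List.countP_congr
  intro a ha
  constructor
  · intro h
    simp only [Function.comp_apply, beq_iff_eq] at h
    simp [hinj a ha h]
  · intro h
    simp only [beq_iff_eq] at h
    simp [Function.comp_apply, h]

-- a counter dict's values sum to the length of the counted list
lemma pvCounterValuesSum (xs : List Int) :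
    (PySem.Dict.counter xs).values.sum = (xs.length : Int) := by
  have hv : (PySem.Dict.counter xs).values = (PySem.Dict.counter xs).items.map (·.2) := rfl
  rw [hv, PySem.Dict.items_counter, List.map_map]
  exact pvSumCountsCover (PySem.Set.ofList xs) xs (PySem.Set.nodup_ofList xs)
    (fun x hx => (PySem.Set.mem_ofList xs x).mpr hx)

-- a sum over a nodup list of tribes equals the sum over range c when the missing terms vanish
lemma pvSumExtend (S : List Nat) (c : Nat) (F : Nat → Int) (hnd : S.Nodup)
    (hmem : ∀ t ∈ S, t < c) (hzero : ∀ t, t < c → t ∉ S → F t = 0) :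
    (S.map F).sum = ((List.range c).map F).sum := by
  have hsplit : ∀ (l : List Nat),
      (l.map F).sum = ((l.filter (fun t => decide (t ∈ S))).map F).sum
        + ((l.filter (fun t => !decide (t ∈ S))).map F).sum := by
    intro l
    induction l with
    | nil => simp
    | cons t l ihl =>
      simp only [List.map_cons, List.sum_cons, List.filter_cons]
      by_cases h : t ∈ S
      · rw [if_pos (by simp [h]), if_neg (by simp [h])]
        simp only [List.map_cons, List.sum_cons, ihl]
        ring
      · rw [if_neg (by simp [h]), if_pos (by simp [h])]
        simp only [List.map_cons, List.sum_cons, ihl]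
        ring
  have hzero2 : (((List.range c).filter (fun t => !decide (t ∈ S))).map F).sum = 0 := by
    have : ∀ t ∈ (List.range c).filter (fun t => !decide (t ∈ S)), F t = 0 := by
      intro t ht
      have h1 := List.mem_filter.mp ht
      have h2 : t < c := List.mem_range.mp h1.1
      have h3 : t ∉ S := by simpa using h1.2
      exact hzero t h2 h3
    rw [List.map_congr_left this]
    simp
  have hperm : ((List.range c).filter (fun t => decide (t ∈ S))).Perm S := by
    rw [List.perm_ext_iff_of_nodup (List.Nodup.filter _ (List.nodup_range)) hnd]
    intro t
    constructor
    · intro ht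
      simpa using (List.mem_filter.mp ht).2
    · intro ht
      exact List.mem_filter.mpr ⟨List.mem_range.mpr (hmem t ht), by simpa using ht⟩
  rw [hsplit (List.range c), hzero2, (hperm.map F).sum_eq]
  ring

-- the whole B-side tail (root sweep + tallies + closed form) computed from the event list
lemma pvAltSide (dA : PySem.Dict Int Nat) (c : Nat) (ev : List (Nat × Int))
    (dP : PySem.Dict Int Int) (links : List (Int × Int))
    (hN : dP.keys.Nodup)
    (hK : ∀ x, dP.contains x = dA.contains x)
    (hT : ∀ x p, dP.get? x = some p → ∃ t, dA.get? x = some t ∧ dA.get? p = some t)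
    (hW : ∀ i, i < dP.items.length → (dP.items.getD i (0, 0)).2 = (dP.items.getD i (0, 0)).1 ∨
        ∃ j, j < i ∧ (dP.items.getD j (0, 0)).1 = (dP.items.getD i (0, 0)).2)
    (hU : ∀ r1 r2 t, dP.get? r1 = some r1 → dP.get? r2 = some r2 →
        dA.get? r1 = some t → dA.get? r2 = some t → r1 = r2)
    (hlen : links.length = ev.length)
    (hE : ∀ i, i < links.length →
        dA.get? (links.getD i (0, 0)).1 = some (ev.getD i (0, 0)).1 ∧
        (ev.getD i (0, 0)).2 = PySem.Int.mod (links.getD i (0, 0)).1 2)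
    (hinv : ∀ e ∈ ev, e.1 < c ∧ (e.2 = 0 ∨ e.2 = 1)) :
    ((links.foldl (pvTallyStep (dP.items.foldl pvRootStep PySem.Dict.empty))
        (PySem.Dict.empty, PySem.Dict.empty)).2.values.sum)
      * ((links.foldl (pvTallyStep (dP.items.foldl pvRootStep PySem.Dict.empty))
          (PySem.Dict.empty, PySem.Dict.empty)).1.values.sum)
      - (((links.foldl (pvTallyStep (dP.items.foldl pvRootStep PySem.Dict.empty))
            (PySem.Dict.empty, PySem.Dict.empty)).1.items.map
          (fun rg => rg.2 * (links.foldl (pvTallyStep (dP.items.foldl pvRootStep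
              PySem.Dict.empty)) (PySem.Dict.empty, PySem.Dict.empty)).2.getD rg.1 0)).sum)
    = ((ev.length : Int) - (((ev.filter (fun e => e.2 == 0)).length : Nat) : Int))
        * (((ev.filter (fun e => e.2 == 0)).length : Nat) : Int)
      - ((List.range c).map
          (fun t => ((ev.count (t, 1) : Nat) : Int) * ((ev.count (t, 0) : Nat) : Int))).sum := by
  set rootD := dP.items.foldl pvRootStep PySem.Dict.empty with hrdef
  set E := (links.filter (fun l => decide (PySem.Int.mod l.1 2 = 0))).map
      (fun l => rootD.getD l.1 l.1) with hEdef
  set O := (links.filter (fun l => !decide (PySem.Int.mod l.1 2 = 0))).map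
      (fun l => rootD.getD l.1 l.1) with hOdef
  have hfsteq : (links.foldl (pvTallyStep rootD) (PySem.Dict.empty, PySem.Dict.empty)).1
      = PySem.Dict.counter E := by
    rw [pvTallySplit, PySem.Dict.foldl_insert_getD_add_one_eq_counter]
  have hsndeq : (links.foldl (pvTallyStep rootD) (PySem.Dict.empty, PySem.Dict.empty)).2
      = PySem.Dict.counter O := by
    rw [pvTallySplit, PySem.Dict.foldl_insert_getD_add_one_eq_counter]
    rfl
  rw [hfsteq, hsndeq, pvCounterValuesSum, pvCounterValuesSum, PySem.Dict.items_counter,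
    List.map_map]
  set σ := fun r : Int => (dA.get? r).getD 0 with hsdef
  set f := fun lnk : Int × Int => (((dA.get? lnk.1).getD 0 : Nat), PySem.Int.mod lnk.1 2)
    with hfdef
  -- the event list is the per-link image under f
  have hevmap : ev = links.map f := by
    apply List.ext_getElem
    · rw [List.length_map]; omega
    · intro i h1 h2
      have hil : i < links.length := by rw [List.length_map] at h2; exact h2
      obtain ⟨hE1, hE2⟩ := hE i hil
      rw [List.getD_eq_getElem _ _ hil, List.getD_eq_getElem _ _ h1] at hE1 hE2
      rw [List.getElem_map]
      refine Prod.ext ?_ ?_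
      · simp only [hfdef]
        rw [hE1]
        rfl
      · simp only [hfdef]
        exact hE2
  -- every node's resolved root is a self-parented root of the same tribe
  have hroot0 : ∀ x p, dP.get? x = some p → ∃ r, rootD.get? x = some r ∧
      dP.get? r = some r ∧ (∀ t, dA.get? x = some t → dA.get? r = some t) := by
    intro x p hx
    have h := pvRootSweep dP dA hN hT hW dP.items.length (le_refl _) x p
      (by rw [List.take_length]; exact PySem.Dict.mem_items_of_get?_eq_some dP hx)
    rw [List.take_length] at h
    rw [hrdef]
    exact h
  have hLR : ∀ lnk ∈ links, dP.get? (rootD.getD lnk.1 lnk.1) = some (rootD.getD lnk.1 lnk.1)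
      ∧ dA.get? (rootD.getD lnk.1 lnk.1) = some ((f lnk).1) := by
    intro lnk hm
    obtain ⟨i, hi, hie⟩ := List.getElem_of_mem hm
    obtain ⟨hE1, _⟩ := hE i hi
    rw [List.getD_eq_getElem _ _ hi, hie] at hE1
    have hcont : dP.contains lnk.1 = true := by rw [hK]; exact pvContains_some hE1
    obtain ⟨p, hp⟩ : ∃ p, dP.get? lnk.1 = some p := by
      rcases hg : dP.get? lnk.1 with _ | p
      · have hfalse := pvContains_none hg
        rw [hfalse] at hcont
        cases hcont
      · exact ⟨p, rfl⟩
    obtain ⟨r, hr1, hr2, hr3⟩ := hroot0 lnk.1 p hp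
    have hgd : rootD.getD lnk.1 lnk.1 = r := by
      rw [PySem.Dict.getD_eq_get?_getD, hr1]
      rfl
    rw [hgd]
    refine ⟨hr2, ?_⟩
    have hf1 : (f lnk).1 = (ev.getD i (0, 0)).1 := by
      simp only [hfdef]
      rw [hE1]
      rfl
    rw [hf1]
    exact hr3 _ hE1
  -- the filtered event projections are images of the filtered links
  have hq0 : ((fun e : Nat × Int => e.2 == 0) ∘ f)
      = (fun l : Int × Int => decide (PySem.Int.mod l.1 2 = 0)) := by
    funext lnk
    simp only [hfdef, Function.comp_apply]
    by_cases h : PySem.Int.mod lnk.1 2 = 0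
    · rw [h]
      rfl
    · rw [beq_eq_false_iff_ne.mpr h, decide_eq_false h]
  have hq1 : ((fun e : Nat × Int => !(e.2 == 0)) ∘ f)
      = (fun l : Int × Int => !decide (PySem.Int.mod l.1 2 = 0)) := by
    funext lnk
    simp only [hfdef, Function.comp_apply]
    by_cases h : PySem.Int.mod lnk.1 2 = 0
    · rw [h]
      rfl
    · rw [beq_eq_false_iff_ne.mpr h, decide_eq_false h]
  have hevG : ev.filter (fun e => e.2 == 0)
      = (links.filter (fun l => decide (PySem.Int.mod l.1 2 = 0))).map f := by
    rw [hevmap, List.filter_map, hq0]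
  have hevB : ev.filter (fun e => !(e.2 == 0))
      = (links.filter (fun l => !decide (PySem.Int.mod l.1 2 = 0))).map f := by
    rw [hevmap, List.filter_map, hq1]
  -- members of E and O are self-parented roots carrying their tribe
  have hrootMem : ∀ k, (k ∈ E ∨ k ∈ O) → dP.get? k = some k ∧ dA.get? k = some (σ k) := by
    intro k hk
    have hget : ∃ lnk ∈ links, rootD.getD lnk.1 lnk.1 = k := by
      rcases hk with hk | hk
      · rw [hEdef] at hk
        obtain ⟨lnk, hlnk, hke⟩ := List.mem_map.mp hk
        exact ⟨lnk, (List.mem_filter.mp hlnk).1, hke⟩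
      · rw [hOdef] at hk
        obtain ⟨lnk, hlnk, hke⟩ := List.mem_map.mp hk
        exact ⟨lnk, (List.mem_filter.mp hlnk).1, hke⟩
    obtain ⟨lnk, hlnk, hke⟩ := hget
    obtain ⟨h1, h2⟩ := hLR lnk hlnk
    rw [hke] at h1 h2
    refine ⟨h1, ?_⟩
    simp only [hsdef]
    rw [h2]
    rfl
  have hinj2 : ∀ a k, (a ∈ E ∨ a ∈ O) → (k ∈ E ∨ k ∈ O) → σ a = σ k → a = k := by
    intro a k haM hkM hs
    obtain ⟨ha1, ha2⟩ := hrootMem a haM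
    obtain ⟨hk1, hk2⟩ := hrootMem k hkM
    exact hU a k (σ k) ha1 hk1 (hs ▸ ha2) hk2
  -- root-keyed lists map under σ to the tribe-keyed lists
  have hmapE : E.map σ = (ev.filter (fun e => e.2 == 0)).map (·.1) := by
    rw [hEdef, List.map_map, hevG, List.map_map]
    apply List.map_congr_left
    intro lnk hlnk
    have h2 := (hLR lnk (List.mem_filter.mp hlnk).1).2
    simp only [Function.comp_apply, hsdef]
    rw [h2]
    rfl
  have hmapO : O.map σ = (ev.filter (fun e => !(e.2 == 0))).map (·.1) := by
    rw [hOdef, List.map_map, hevB, List.map_map]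
    apply List.map_congr_left
    intro lnk hlnk
    have h2 := (hLR lnk (List.mem_filter.mp hlnk).1).2
    simp only [Function.comp_apply, hsdef]
    rw [h2]
    rfl
  -- counts keyed by root equal counts keyed by tribe
  have hcE : ∀ k ∈ PySem.Set.ofList E,
      (List.count k E : Int) = (List.count (σ k) ((ev.filter (fun e => e.2 == 0)).map (·.1)) : Int) := by
    intro k hk
    rw [← hmapE, pvCountMapInj E σ k
      (fun a ha hsa => hinj2 a k (Or.inl ha) (Or.inl ((PySem.Set.mem_ofList E k).mp hk)) hsa)]
  have hcO : ∀ k ∈ PySem.Set.ofList E,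
      (List.count k O : Int) = (List.count (σ k) ((ev.filter (fun e => !(e.2 == 0))).map (·.1)) : Int) := by
    intro k hk
    rw [← hmapO, pvCountMapInj O σ k
      (fun a ha hsa => hinj2 a k (Or.inr ha) (Or.inl ((PySem.Set.mem_ofList E k).mp hk)) hsa)]
  set G := fun t : Nat => (List.count t ((ev.filter (fun e => e.2 == 0)).map (·.1)) : Int)
      * (List.count t ((ev.filter (fun e => !(e.2 == 0))).map (·.1)) : Int) with hGdef
  -- rewrite the cross sum through σ
  have hcross : ((PySem.Set.ofList E).map ((fun rg : Int × Int =>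
        rg.2 * (PySem.Dict.counter O).getD rg.1 0) ∘ (fun k => (k, (List.count k E : Int))))).sum
      = (((PySem.Set.ofList E).map σ).map G).sum := by
    rw [List.map_map]
    apply congrArg
    apply List.map_congr_left
    intro k hk
    simp only [Function.comp_apply, PySem.Dict.getD_counter, hGdef]
    rw [hcE k hk, hcO k hk]
  -- the σ-image of the distinct roots is a permutation of the distinct girl tribes
  have hpermσ : ((PySem.Set.ofList E).map σ).Perm
      (PySem.Set.ofList ((ev.filter (fun e => e.2 == 0)).map (·.1))) := by
    rw [List.perm_ext_iff_of_nodup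
      (List.Nodup.map_on
        (fun a ha b hb hs => hinj2 a b (Or.inl ((PySem.Set.mem_ofList E a).mp ha))
          (Or.inl ((PySem.Set.mem_ofList E b).mp hb)) hs)
        (PySem.Set.nodup_ofList E))
      (PySem.Set.nodup_ofList _)]
    intro t
    rw [PySem.Set.mem_ofList]
    constructor
    · intro ht
      obtain ⟨k, hk, hkt⟩ := List.mem_map.mp ht
      rw [← hkt, ← hmapE]
      exact List.mem_map_of_mem ((PySem.Set.mem_ofList E k).mp hk)
    · intro ht
      rw [← hmapE] at ht
      obtain ⟨k, hk, hkt⟩ := List.mem_map.mp ht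
      exact List.mem_map.mpr ⟨k, (PySem.Set.mem_ofList E k).mpr hk, hkt⟩
  -- extend the sum over the occurring girl tribes to all of range c
  have hext : ((PySem.Set.ofList ((ev.filter (fun e => e.2 == 0)).map (·.1))).map G).sum
      = ((List.range c).map G).sum := by
    apply pvSumExtend _ c G (PySem.Set.nodup_ofList _)
    · intro t ht
      rw [PySem.Set.mem_ofList] at ht
      obtain ⟨e, he, het⟩ := List.mem_map.mp ht
      rw [← het]
      exact (hinv e (List.mem_of_mem_filter he)).1
    · intro t _ htS
      have hz : List.count t ((ev.filter (fun e => e.2 == 0)).map (·.1)) = 0 :=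
        List.count_eq_zero.mpr (fun hmem => htS ((PySem.Set.mem_ofList _ t).mpr hmem))
      simp only [hGdef]
      rw [hz]
      simp
  -- per tribe, the two projected counts are the event-pair counts
  have hGt : ∀ t ∈ List.range c,
      G t = ((ev.count (t, 1) : Nat) : Int) * ((ev.count (t, 0) : Nat) : Int) := by
    intro t _
    have hg : List.count t ((ev.filter (fun e => e.2 == 0)).map (·.1)) = ev.count (t, 0) := by
      rw [List.count_eq_countP, List.countP_map, List.countP_filter,
        List.count_eq_countP]
      apply List.countP_congr
      intro e _
      constructor
      · intro h
        simp only [Function.comp_apply, Bool.and_eq_true, beq_iff_eq] at h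
        simp [Prod.ext_iff, h.1, h.2]
      · intro h
        simp only [beq_iff_eq] at h
        simp [Function.comp_apply, h]
    have hb : List.count t ((ev.filter (fun e => !(e.2 == 0))).map (·.1)) = ev.count (t, 1) := by
      rw [List.count_eq_countP, List.countP_map, List.countP_filter,
        List.count_eq_countP]
      apply List.countP_congr
      intro e he
      rcases (hinv e he).2 with h2 | h2
      · constructor
        · intro h
          simp only [Function.comp_apply, Bool.and_eq_true, beq_iff_eq, Bool.not_eq_true',
            beq_eq_false_iff_ne] at h
          exact absurd h2 h.2
        · intro h
          simp only [beq_iff_eq] at h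
          rw [h] at h2
          simp at h2
      · constructor
        · intro h
          simp only [Function.comp_apply, Bool.and_eq_true, beq_iff_eq] at h
          simp [Prod.ext_iff, h.1, h2]
        · intro h
          simp only [beq_iff_eq] at h
          simp [Function.comp_apply, h]
    simp only [hGdef]
    rw [hg, hb]
    ring
  have hrange : ((List.range c).map G).sum
      = ((List.range c).map
          (fun t => ((ev.count (t, 1) : Nat) : Int) * ((ev.count (t, 0) : Nat) : Int))).sum := by
    apply congrArg
    exact List.map_congr_left hGt
  -- lengths: total girls / boys
  have hElen : E.length = (ev.filter (fun e => e.2 == 0)).length := by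
    rw [hEdef, List.length_map, hevG, List.length_map]
  have hOlen : O.length = (ev.filter (fun e => !(e.2 == 0))).length := by
    rw [hOdef, List.length_map, hevB, List.length_map]
  have hsum : (ev.filter (fun e => e.2 == 0)).length + (ev.filter (fun e => !(e.2 == 0))).length
      = ev.length := by
    rw [← List.countP_eq_length_filter, ← List.countP_eq_length_filter]
    rw [List.length_eq_countP_add_countP (fun e : Nat × Int => e.2 == 0) (l := ev)]
    congr 1
    apply List.countP_congr
    intro e _
    by_cases h : e.2 = 0 <;> simp [h]
  rw [hcross, (hpermσ.map G).sum_eq, hext, hrange]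
  have h1 : (O.length : Int) = (ev.length : Int)
      - (((ev.filter (fun e => e.2 == 0)).length : Nat) : Int) := by
    rw [hOlen]
    omega
  have h2 : (E.length : Int) = (((ev.filter (fun e => e.2 == 0)).length : Nat) : Int) := by
    rw [hElen]
  rw [h1, h2]

-- ===== VERDICT (by name: the statement is the Claim_ definition above) =====
theorem get_comb_num_spec : Claim_equal_get_comb_num := by
  unfold Claim_equal_get_comb_num
  intro l _
  unfold Spec_get_comb_num
  obtain ⟨hinv, heq⟩ := pvLoop l PySem.Dict.empty 0 []
    (by intro e he; cases he)
    (by intro k v hk; rw [PySem.Dict.get?_empty] at hk; cases hk)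
  have h0 : pvTally 0 ([] : List (Nat × Int)) ++ [((0 : Int), (0 : Int))]
      = [((0 : Int), (0 : Int))] := by simp [pvTally]
  rw [h0] at heq
  have hJ0 : pvJ PySem.Dict.empty 0 [] PySem.Dict.empty [] := by
    refine ⟨?_, ?_, ?_, ?_, ?_, ?_, ?_, ?_⟩
    · exact PySem.Dict.nodup_keys_empty
    · intro x
      rw [PySem.Dict.contains_empty, PySem.Dict.contains_empty]
    · intro x p hx
      rw [PySem.Dict.get?_empty] at hx
      cases hx
    · intro i hi
      have hz : (PySem.Dict.empty : PySem.Dict Int Int).items.length = 0 := rfl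
      omega
    · intro r1 r2 t h1 h2 h3 h4
      rw [PySem.Dict.get?_empty] at h1
      cases h1
    · intro k v hk
      rw [PySem.Dict.get?_empty] at hk
      cases hk
    · rfl
    · intro i hi
      simp at hi
  obtain ⟨hN, hK, hT, hW, hU, hV, hlen, hE⟩ := pvJoint l PySem.Dict.empty 0 []
    PySem.Dict.empty [] hJ0
  have hfinalA := pvFinal (l.foldl pvRef (PySem.Dict.empty, 0, [])).2.1
    (l.foldl pvRef (PySem.Dict.empty, 0, [])).2.2
    (fun e he => (hinv e he).1) (fun e he => (hinv e he).2)
  have hBside := pvAltSide (l.foldl pvRef (PySem.Dict.empty, 0, [])).1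
    (l.foldl pvRef (PySem.Dict.empty, 0, [])).2.1
    (l.foldl pvRef (PySem.Dict.empty, 0, [])).2.2
    (l.foldl pvLink (PySem.Dict.empty, [])).1
    (l.foldl pvLink (PySem.Dict.empty, [])).2
    hN hK hT hW hU hlen hE hinv
  have hAeq : get_comb_num l
      = (((l.foldl pvRef (PySem.Dict.empty, 0, [])).2.2.length : Int)
            - (((l.foldl pvRef (PySem.Dict.empty, 0, [])).2.2.filter
                (fun e => e.2 == 0)).length : Int))
          * (((l.foldl pvRef (PySem.Dict.empty, 0, [])).2.2.filter
              (fun e => e.2 == 0)).length : Int)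
        - ((List.range (l.foldl pvRef (PySem.Dict.empty, 0, [])).2.1).map
            (fun t => (((l.foldl pvRef (PySem.Dict.empty, 0, [])).2.2.count (t, 1) : Nat) : Int)
              * (((l.foldl pvRef (PySem.Dict.empty, 0, [])).2.2.count (t, 0) : Nat) : Int))).sum := by
    simp only [get_comb_num, heq]
    exact hfinalA
  rw [hAeq, ← hBside]
  rfl
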